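-- pv_equiv track=rewrite | github.com/pypi-data/pypi-mirror-301 | packages/rlpp/rlpp-0.4.7.tar.gz/rlpp-0.4.7/rlpp/resources/originals/utils.py | getMinWidth
-- ===== SOURCE A (Python) =====
-- def getMinWidth(WIDTHS, acc, poin):
--     if acc == len(WIDTHS):
--         return(poin)
--     else:
--         if WIDTHS[acc] < WIDTHS[poin]:
--             score = getMinWidth(WIDTHS, acc+1 ,acc)
--         else:
--             score = getMinWidth(WIDTHS, acc+1 ,poin)
--     return(score)
-- ===== SOURCE B (Python) =====
-- def getMinWidth(WIDTHS, acc, poin):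
--     for i in range(acc, len(WIDTHS)):
--         if WIDTHS[i] < WIDTHS[poin]:
--             poin = i
--     return poin
-- ===== Notes on version B (the rewrite author's own statement) =====
-- stated objective: simpler
-- what changed: Replaces the tail recursion (one Python call frame per element) with a single iterative for-loop keeping the running best index; avoids recursion depth limits.
import Mathlib
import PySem

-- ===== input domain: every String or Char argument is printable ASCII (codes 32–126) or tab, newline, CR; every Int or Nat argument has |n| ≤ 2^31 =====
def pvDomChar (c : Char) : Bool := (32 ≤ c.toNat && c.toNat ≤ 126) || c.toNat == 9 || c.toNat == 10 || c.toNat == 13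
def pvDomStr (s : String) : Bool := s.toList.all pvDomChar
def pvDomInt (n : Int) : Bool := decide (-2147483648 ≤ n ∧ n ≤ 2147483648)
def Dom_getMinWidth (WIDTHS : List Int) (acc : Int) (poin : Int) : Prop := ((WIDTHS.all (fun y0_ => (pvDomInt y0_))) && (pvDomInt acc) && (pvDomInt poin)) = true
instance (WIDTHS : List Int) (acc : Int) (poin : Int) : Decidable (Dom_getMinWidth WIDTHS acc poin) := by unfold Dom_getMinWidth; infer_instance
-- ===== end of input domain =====

-- B replaces A's tail recursion (one call frame per element) by a single iterative loop
-- over range(acc, len(WIDTHS)) keeping the running best index; return value equivalence only.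

-- ===== PORT A =====
def getMinWidth (WIDTHS : List Int) (acc : Int) (poin : Int) : Int :=
  if acc = (WIDTHS.length : Int) then poin
  else
    match h1 : PySem.List.pyGet? WIDTHS acc, PySem.List.pyGet? WIDTHS poin with
    | some a, some p =>
        if a < p then getMinWidth WIDTHS (acc + 1) acc
        else getMinWidth WIDTHS (acc + 1) poin
    | _, _ => 0  -- IndexError in Python; excluded by Pre_
termination_by ((WIDTHS.length : Int) - acc).toNat
decreasing_by
  all_goals
    have hne : PySem.List.pyGet? WIDTHS acc ≠ none := by simp [h1]
    rw [Ne, PySem.List.pyGet?_eq_none_iff] at hne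
    have hin := not_not.mp hne
    unfold PySem.Raise.InRange at hin
    omega

-- ===== PORT B =====
-- WIDTHS[i] is ported as pyGetD (exact: Pre_ keeps every index the loop reads in range)
def getMinWidth_alt (WIDTHS : List Int) (acc : Int) (poin : Int) : Int :=
  (PySem.List.pyRange acc (WIDTHS.length : Int) 1).foldl
    (fun p i => if PySem.List.pyGetD WIDTHS i 0 < PySem.List.pyGetD WIDTHS p 0 then i else p)
    poin

-- ===== PRECONDITION & SPEC =====
-- Pre_ excludes exactly the inputs on which Python A raises IndexError (an index outside
-- Python's valid range for WIDTHS) or recurses without returning.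
def Pre_getMinWidth (WIDTHS : List Int) (acc : Int) (poin : Int) : Prop :=
  acc = (WIDTHS.length : Int) ∨
    (-(WIDTHS.length : Int) ≤ acc ∧ acc < (WIDTHS.length : Int) ∧
     -(WIDTHS.length : Int) ≤ poin ∧ poin < (WIDTHS.length : Int))
instance (WIDTHS : List Int) (acc : Int) (poin : Int) : Decidable (Pre_getMinWidth WIDTHS acc poin) := by unfold Pre_getMinWidth; infer_instance

def pvWitness_getMinWidth : List Int × Int × Int := ([3, 1, 2], 0, 0)

def Spec_getMinWidth (WIDTHS : List Int) (acc : Int) (poin : Int) (out : Int) : Prop := out = getMinWidth_alt WIDTHS acc poin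
instance (WIDTHS : List Int) (acc : Int) (poin : Int) (out : Int) : Decidable (Spec_getMinWidth WIDTHS acc poin out) := by unfold Spec_getMinWidth; infer_instance

-- ===== CLAIM (what is proved, stated in full; the proofs are below) =====
def Claim_equal_getMinWidth : Prop := ∀ (WIDTHS : List Int) (acc : Int) (poin : Int), Dom_getMinWidth WIDTHS acc poin → Pre_getMinWidth WIDTHS acc poin → Spec_getMinWidth WIDTHS acc poin (getMinWidth WIDTHS acc poin)

-- ===== LEMMAS AND PROOFS =====

theorem pyGetD_eq_of_pyGet? (xs : List Int) (i : Int) (a d : Int)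
    (h : PySem.List.pyGet? xs i = some a) : PySem.List.pyGetD xs i d = a := by
  simp [PySem.List.pyGetD, h]

theorem pyGet?_isSome_of_inRange (xs : List Int) (i : Int)
    (h : -(xs.length : Int) ≤ i ∧ i < (xs.length : Int)) :
    ∃ x, PySem.List.pyGet? xs i = some x := by
  rcases h2 : PySem.List.pyGet? xs i with _ | x
  · rw [PySem.List.pyGet?_eq_none_iff] at h2
    exact absurd (by unfold PySem.Raise.InRange; omega) h2
  · exact ⟨x, rfl⟩

theorem getMinWidth_eq_alt (WIDTHS : List Int) :
    ∀ (k : Nat) (acc poin : Int), ((WIDTHS.length : Int) - acc).toNat = k →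
      Pre_getMinWidth WIDTHS acc poin →
      getMinWidth WIDTHS acc poin = getMinWidth_alt WIDTHS acc poin := by
  intro k
  induction k with
  | zero =>
    intro acc poin hk hpre
    have hacc : acc = (WIDTHS.length : Int) := by
      rcases hpre with h | h
      · exact h
      · omega
    rw [getMinWidth, getMinWidth_alt, if_pos hacc,
        PySem.List.pyRange_one_eq_nil (by omega)]
    rfl
  | succ m ih =>
    intro acc poin hk hpre
    have hacc : acc < (WIDTHS.length : Int) := by omega
    rcases hpre with h | h
    · omega
    obtain ⟨a, ha⟩ := pyGet?_isSome_of_inRange WIDTHS acc ⟨h.1, h.2.1⟩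
    obtain ⟨p, hp⟩ := pyGet?_isSome_of_inRange WIDTHS poin ⟨h.2.2.1, h.2.2.2⟩
    have hrange : PySem.List.pyRange acc (WIDTHS.length : Int) 1
        = acc :: PySem.List.pyRange (acc + 1) (WIDTHS.length : Int) 1 :=
      PySem.List.pyRange_one_cons hacc
    rw [getMinWidth, if_neg (by omega), ha, hp]
    rw [getMinWidth_alt, hrange, List.foldl_cons,
        pyGetD_eq_of_pyGet? WIDTHS acc a 0 ha, pyGetD_eq_of_pyGet? WIDTHS poin p 0 hp]
    dsimp only
    by_cases hlt : a < p
    · rw [if_pos hlt, if_pos hlt,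
          ih (acc + 1) acc (by omega) (by unfold Pre_getMinWidth; omega),
          getMinWidth_alt]
    · rw [if_neg hlt, if_neg hlt,
          ih (acc + 1) poin (by omega) (by unfold Pre_getMinWidth; omega),
          getMinWidth_alt]

-- ===== VERDICT (by name: the statement is the Claim_ definition above) =====
theorem getMinWidth_spec : Claim_equal_getMinWidth := by
  intro WIDTHS acc poin _ hpre
  unfold Spec_getMinWidth
  exact getMinWidth_eq_alt WIDTHS _ acc poin rfl hpre
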